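-- pv_equiv track=rewrite | github.com/Maleya/project-euler | 05_div/main.py | is_div
-- ===== SOURCE A (Python) =====
-- def is_div(number, div=20):
--     counter = 0
--     for i in range(1, div+1):
--         if number % i == 0:
--             counter += 1
--     if counter >= div:
--         return(True)
--     return(False)
-- ===== SOURCE B (Python) =====
-- import math
--
-- def is_div(number, div=20):
--     if number == 0:
--         return True
--     n = abs(number)
--     L = 1
--     for i in range(1, div + 1):
--         L = math.lcm(L, i)
--         if L > n:
--             return False
--     return number % L == 0
-- ===== Notes on version B (the rewrite author's own statement) =====
-- stated objective: faster
-- what changed: Replaces the per-element divisor count compared against div by folding lcm over 1..div into one aggregate with early exit once the lcm exceeds |number|, then a single modulo test.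
import Mathlib
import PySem

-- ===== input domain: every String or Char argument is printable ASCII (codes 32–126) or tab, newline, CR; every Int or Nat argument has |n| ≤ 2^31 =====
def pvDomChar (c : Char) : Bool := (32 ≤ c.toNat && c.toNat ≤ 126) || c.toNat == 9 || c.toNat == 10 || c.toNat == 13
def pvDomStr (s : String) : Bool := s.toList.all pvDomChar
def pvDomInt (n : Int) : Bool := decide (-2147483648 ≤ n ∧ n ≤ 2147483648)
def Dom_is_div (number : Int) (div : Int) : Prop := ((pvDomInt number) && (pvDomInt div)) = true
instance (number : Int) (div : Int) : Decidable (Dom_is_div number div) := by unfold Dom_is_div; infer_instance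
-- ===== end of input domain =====

-- B replaces A's per-element divisor count with an lcm reduction (early exit once the lcm exceeds |number|) plus one modulo test; faster for large div.

-- ===== PORT A =====
def is_div (number : Int) (div : Int) : Bool :=
  let counter := (PySem.List.pyRange 1 (div + 1) 1).foldl
    (fun c i => if PySem.Int.mod number i == 0 then c + 1 else c) (0 : Int)
  if counter ≥ div then true else false

-- ===== PORT B =====
-- B's loop with early return: some L = loop finished with accumulator L, none = returned False early.
def isDivAltLoop (n : Int) (L : Int) : List Int → Option Int
  | [] => some L
  | i :: t =>
    if (Int.lcm L i : Int) > n then none else isDivAltLoop n (Int.lcm L i : Int) t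

def is_div_alt (number : Int) (div : Int) : Bool :=
  if number == 0 then true
  else
    match isDivAltLoop (Int.natAbs number : Int) 1 (PySem.List.pyRange 1 (div + 1) 1) with
    | none => false
    | some L => PySem.Int.mod number L == 0

-- ===== PRECONDITION & SPEC =====
def Spec_is_div (number : Int) (div : Int) (out : Bool) : Prop := out = is_div_alt number div
instance (number : Int) (div : Int) (out : Bool) : Decidable (Spec_is_div number div out) := by unfold Spec_is_div; infer_instance

-- ===== CLAIM (what is proved, stated in full; the proofs are below) =====
def Claim_equal_is_div : Prop := ∀ (number : Int) (div : Int), Dom_is_div number div → Spec_is_div number div (is_div number div)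

-- ===== LEMMAS AND PROOFS =====

-- A's counter fold is a countP.
theorem count_fold_eq (number : Int) (l : List Int) (c : Int) :
    l.foldl (fun c i => if PySem.Int.mod number i == 0 then c + 1 else c) c
      = c + l.countP (fun i => PySem.Int.mod number i == 0) := by
  induction l generalizing c with
  | nil => simp
  | cons a t ih =>
    simp only [List.foldl_cons, List.countP_cons, ih]
    split_ifs with h
    · omega
    · omega

-- The lcm fold divides n iff the accumulator and every element do.
theorem lcm_fold_dvd (l : List Int) (acc n : Int) :
    ((l.foldl (fun L i => (Int.lcm L i : Int)) acc) ∣ n)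
      ↔ (acc ∣ n ∧ ∀ i ∈ l, i ∣ n) := by
  induction l generalizing acc with
  | nil => simp
  | cons a t ih =>
    simp only [List.foldl_cons, ih, List.mem_cons]
    constructor
    · rintro ⟨h1, h2⟩
      refine ⟨dvd_trans (Int.dvd_lcm_left acc a) h1, ?_⟩
      rintro i (rfl | hi)
      · exact dvd_trans (Int.dvd_lcm_right acc i) h1
      · exact h2 i hi
    · rintro ⟨h1, h2⟩
      exact ⟨Int.coe_lcm_dvd h1 (h2 a (Or.inl rfl)), fun i hi => h2 i (Or.inr hi)⟩

-- The accumulator divides the lcm fold's final value.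
theorem acc_dvd_lcm_fold (l : List Int) (acc : Int) :
    acc ∣ (l.foldl (fun L i => (Int.lcm L i : Int)) acc) := by
  induction l generalizing acc with
  | nil => simp
  | cons a t ih => exact dvd_trans (Int.dvd_lcm_left acc a) (ih _)

-- If the loop finishes, it returns exactly the plain lcm fold.
theorem isDivAltLoop_some (n : Int) (l : List Int) (acc L : Int)
    (h : isDivAltLoop n acc l = some L) :
    L = l.foldl (fun L i => (Int.lcm L i : Int)) acc := by
  induction l generalizing acc with
  | nil => simpa [isDivAltLoop] using h.symm
  | cons a t ih =>
    unfold isDivAltLoop at h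
    split_ifs at h with hgt
    · exact (ih _ h)

-- If the loop exits early, the full lcm fold cannot divide number (number ≠ 0).
theorem isDivAltLoop_none (number : Int) (hne : number ≠ 0) (l : List Int) (acc : Int)
    (h : isDivAltLoop (Int.natAbs number : Int) acc l = none) :
    ¬ (l.foldl (fun L i => (Int.lcm L i : Int)) acc) ∣ number := by
  induction l generalizing acc with
  | nil => simp [isDivAltLoop] at h
  | cons a t ih =>
    unfold isDivAltLoop at h
    split_ifs at h with hgt
    · -- accumulator already exceeds |number|: it divides the fold, so the fold cannot divide number
      intro hdvd
      have hacc : ((Int.lcm acc a : Nat) : Int) ∣ number :=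
        dvd_trans (acc_dvd_lcm_fold t _) hdvd
      have h1 : (Int.lcm acc a : Nat) ∣ number.natAbs := by
        have := Int.natAbs_dvd_natAbs.mpr hacc
        simpa using this
      have h2 : (Int.lcm acc a : Nat) ≤ number.natAbs :=
        Nat.le_of_dvd (Int.natAbs_pos.mpr hne) h1
      have : ((Int.lcm acc a : Nat) : Int) ≤ (number.natAbs : Int) := by exact_mod_cast h2
      omega
    · exact ih _ h

-- B returns true exactly when the plain lcm fold divides number.
theorem alt_true_iff (number div : Int) :
    is_div_alt number div = true
      ↔ ((PySem.List.pyRange 1 (div + 1) 1).foldl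
          (fun L i => (Int.lcm L i : Int)) 1) ∣ number := by
  unfold is_div_alt
  by_cases h0 : number = 0
  · simp [h0]
  · simp only [beq_iff_eq, h0, ite_false]
    cases hloop : isDivAltLoop (Int.natAbs number : Int) 1 (PySem.List.pyRange 1 (div + 1) 1) with
    | none =>
      simp only [Bool.false_eq_true, false_iff]
      exact isDivAltLoop_none number h0 _ 1 hloop
    | some L =>
      rw [isDivAltLoop_some _ _ _ _ hloop]
      simp [PySem.Int.mod_eq_zero_iff_dvd]

-- A returns true exactly when the plain lcm fold divides number.
theorem a_true_iff (number div : Int) :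
    is_div number div = true
      ↔ ((PySem.List.pyRange 1 (div + 1) 1).foldl
          (fun L i => (Int.lcm L i : Int)) 1) ∣ number := by
  unfold is_div
  rcases le_or_gt div 0 with hle | hpos
  · rw [PySem.List.pyRange_one_eq_nil (by omega)]
    simp [hle]
  · set l := PySem.List.pyRange 1 (div + 1) 1 with hl
    have hlen : (l.length : Int) = div := by
      rw [hl, PySem.List.length_pyRange_one]; omega
    have hall : ∀ i ∈ l, (PySem.Int.mod number i == 0) = true ↔ i ∣ number := by
      intro i _
      simp [PySem.Int.mod_eq_zero_iff_dvd]
    have hcount_le : l.countP (fun i => PySem.Int.mod number i == 0) ≤ l.length :=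
      List.countP_le_length
    rw [count_fold_eq, lcm_fold_dvd]
    simp only [zero_add]
    constructor
    · intro h
      refine ⟨one_dvd _, fun i hi => ?_⟩
      have hge : (l.countP (fun i => PySem.Int.mod number i == 0) : Int) ≥ div := by
        by_contra hc
        simp [hc] at h
      have hc : l.countP (fun i => PySem.Int.mod number i == 0) = l.length := by omega
      exact (hall i hi).mp (List.countP_eq_length.mp hc i hi)
    · rintro ⟨-, hdvd⟩
      have hc : l.countP (fun i => PySem.Int.mod number i == 0) = l.length := by
        rw [List.countP_eq_length]
        intro i hi; exact (hall i hi).mpr (hdvd i hi)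
      have : (l.countP (fun i => PySem.Int.mod number i == 0) : Int) ≥ div := by omega
      simp [this]

-- ===== VERDICT (by name: the statement is the Claim_ definition above) =====
theorem is_div_spec : Claim_equal_is_div := by
  intro number div _
  unfold Spec_is_div
  have := (a_true_iff number div).trans (alt_true_iff number div).symm
  cases hA : is_div number div <;> cases hB : is_div_alt number div <;>
    simp_all
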